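-- pv_equiv track=rewrite | github.com/ognile/commentfront | backend/appeal_manager.py | _parse_verify_status
-- ===== SOURCE A (Python) =====
-- from typing import Dict, Any, List
--
-- RESOLVED_SIGNALS = [
--     "resolved", "no longer active", "restriction ended",
--     "already resolved", "no active restriction",
--     "restriction may be lifted", "no restriction notices",
-- ]
--
-- ACTIVE_SIGNALS = ["active: restriction active"]
--
-- IN_REVIEW_SIGNALS = ["in_review:", "appeal already submitted", "already in review"]
--
-- def _scan_steps_for_signals(result: Dict, signals: List[str]) -> bool:
--     """Check if any agent step contains any of the given signal strings."""
--     for step in result.get("steps", []):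
--         combined = (
--             str(step.get("action_taken", "")).lower() + " " +
--             str(step.get("reasoning", "")).lower()
--         )
--         if any(s in combined for s in signals):
--             return True
--     return False
--
-- def _parse_verify_status(result: Dict) -> str:
--     """Extract RESOLVED/ACTIVE/IN_REVIEW/UNKNOWN from verify agent result."""
--     # Check the last DONE/FAILED action for structured reason
--     for step in reversed(result.get("steps", [])):
--         action = str(step.get("action_taken", ""))
--         if "reason=" in action:
--             parts = action.split("reason=", 1)
--             if len(parts) > 1:
--                 reason = parts[1].strip().strip('"')
--                 # Return the structured prefix (RESOLVED:, ACTIVE:, IN_REVIEW:, etc.)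
--                 return reason
--
--     # Fallback: scan all steps for signal keywords
--     if _scan_steps_for_signals(result, RESOLVED_SIGNALS):
--         return "RESOLVED: detected from agent reasoning"
--     if _scan_steps_for_signals(result, IN_REVIEW_SIGNALS):
--         return "IN_REVIEW: detected from agent reasoning"
--     if _scan_steps_for_signals(result, ACTIVE_SIGNALS):
--         return "ACTIVE: detected from agent reasoning"
--
--     return "UNKNOWN: could not determine restriction status"
-- ===== SOURCE B (Python) =====
-- RESOLVED_SIGNALS = [
--     "resolved", "no longer active", "restriction ended",
--     "already resolved", "no active restriction",
--     "restriction may be lifted", "no restriction notices",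
-- ]
--
-- ACTIVE_SIGNALS = ["active: restriction active"]
--
-- IN_REVIEW_SIGNALS = ["in_review:", "appeal already submitted", "already in review"]
--
--
-- def _parse_verify_status(result):
--     steps = result.get("steps", [])
--
--     # Phase 1 (unchanged): last DONE/FAILED action with a structured reason
--     for step in reversed(steps):
--         action = str(step.get("action_taken", ""))
--         if "reason=" in action:
--             return action.split("reason=", 1)[1].strip().strip('"')
--
--     # Phase 2: ONE pass over the steps, building each combined string once
--     # and recording which signal families were seen; priority decided after.
--     found_resolved = found_in_review = found_active = False
--     for step in steps:
--         combined = (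
--             str(step.get("action_taken", "")).lower() + " " +
--             str(step.get("reasoning", "")).lower()
--         )
--         found_resolved = found_resolved or any(s in combined for s in RESOLVED_SIGNALS)
--         found_in_review = found_in_review or any(s in combined for s in IN_REVIEW_SIGNALS)
--         found_active = found_active or any(s in combined for s in ACTIVE_SIGNALS)
--
--     if found_resolved:
--         return "RESOLVED: detected from agent reasoning"
--     if found_in_review:
--         return "IN_REVIEW: detected from agent reasoning"
--     if found_active:
--         return "ACTIVE: detected from agent reasoning"
--     return "UNKNOWN: could not determine restriction status"
-- ===== Notes on version B (the rewrite author's own statement) =====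
-- stated objective: alternative
-- what changed: The three separate full scans of the steps (one per signal family, each rebuilding every combined action+reasoning string) are replaced by a single pass that builds each combined string once and sets three flags, with the RESOLVED > IN_REVIEW > ACTIVE priority decided after the loop.
import Mathlib
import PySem

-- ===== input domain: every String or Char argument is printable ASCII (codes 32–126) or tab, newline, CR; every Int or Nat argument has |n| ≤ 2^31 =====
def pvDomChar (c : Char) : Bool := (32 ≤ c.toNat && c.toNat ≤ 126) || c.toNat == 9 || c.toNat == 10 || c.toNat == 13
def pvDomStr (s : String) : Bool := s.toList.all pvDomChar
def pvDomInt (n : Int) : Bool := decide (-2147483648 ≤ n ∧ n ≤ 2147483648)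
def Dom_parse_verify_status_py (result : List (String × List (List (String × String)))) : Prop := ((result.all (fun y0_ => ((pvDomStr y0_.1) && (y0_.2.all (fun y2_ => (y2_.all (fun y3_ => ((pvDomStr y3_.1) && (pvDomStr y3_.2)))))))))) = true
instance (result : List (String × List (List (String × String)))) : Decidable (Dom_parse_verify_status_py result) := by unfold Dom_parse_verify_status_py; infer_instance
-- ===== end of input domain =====

-- B replaces the three separate full signal scans by one pass that builds each
-- combined string once and keeps three flags; priority is decided after the loop.

-- shared constants and small shared helpers (same in both Python sources)
def pvResolvedSignals : List String :=
  ["resolved", "no longer active", "restriction ended",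
   "already resolved", "no active restriction",
   "restriction may be lifted", "no restriction notices"]

def pvActiveSignals : List String := ["active: restriction active"]

def pvInReviewSignals : List String :=
  ["in_review:", "appeal already submitted", "already in review"]

-- result.get("steps", []) / step.get(k, "")
def pvSteps (result : List (String × List (List (String × String)))) :
    List (List (String × String)) :=
  (PySem.Dict.mk result).getD "steps" []

def pvStepGet (step : List (String × String)) (k : String) : String :=
  (PySem.Dict.mk step).getD k ""

-- combined = str(step.get("action_taken","")).lower() + " " + str(step.get("reasoning","")).lower()
def pvCombined (step : List (String × String)) : String :=
  PySem.Str.lower (pvStepGet step "action_taken") ++ " " ++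
    PySem.Str.lower (pvStepGet step "reasoning")

-- phase 1, identical in both sources: for step in reversed(steps): … return …
def pvPhase1 : List (List (String × String)) → Option String
  | [] => none
  | step :: rest =>
    let action := pvStepGet step "action_taken"
    if PySem.Str.isIn "reason=" action then
      let parts := (PySem.Str.splitMax? action "reason=" 1).getD []
      if parts.length > 1 then
        some (PySem.Str.stripChars (PySem.Str.strip (PySem.List.pyGetD parts 1 "")) "\"")
      else pvPhase1 rest
    else pvPhase1 rest

-- ===== PORT A =====
-- _scan_steps_for_signals: loop with early return True
def scanStepsForSignals : List (List (String × String)) → List String → Bool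
  | [], _ => false
  | step :: rest, signals =>
    let combined := pvCombined step
    if signals.any (fun s => PySem.Str.isIn s combined) then true
    else scanStepsForSignals rest signals

def parse_verify_status_py (result : List (String × List (List (String × String)))) : String :=
  let steps := pvSteps result
  match pvPhase1 steps.reverse with
  | some reason => reason
  | none =>
    if scanStepsForSignals steps pvResolvedSignals then
      "RESOLVED: detected from agent reasoning"
    else if scanStepsForSignals steps pvInReviewSignals then
      "IN_REVIEW: detected from agent reasoning"
    else if scanStepsForSignals steps pvActiveSignals then
      "ACTIVE: detected from agent reasoning"
    else "UNKNOWN: could not determine restriction status"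

-- ===== PORT B =====
-- single pass setting three flags (found_resolved, found_in_review, found_active)
def parse_verify_status_py_alt (result : List (String × List (List (String × String)))) : String :=
  let steps := pvSteps result
  match pvPhase1 steps.reverse with
  | some reason => reason
  | none =>
    let flags : Bool × Bool × Bool :=
      steps.foldl
        (fun (acc : Bool × Bool × Bool) step =>
          let combined := pvCombined step
          (acc.1 || pvResolvedSignals.any (fun s => PySem.Str.isIn s combined),
           acc.2.1 || pvInReviewSignals.any (fun s => PySem.Str.isIn s combined),
           acc.2.2 || pvActiveSignals.any (fun s => PySem.Str.isIn s combined)))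
        (false, false, false)
    if flags.1 then "RESOLVED: detected from agent reasoning"
    else if flags.2.1 then "IN_REVIEW: detected from agent reasoning"
    else if flags.2.2 then "ACTIVE: detected from agent reasoning"
    else "UNKNOWN: could not determine restriction status"

-- ===== PRECONDITION & SPEC =====
def Spec_parse_verify_status_py (result : List (String × List (List (String × String)))) (out : String) : Prop := out = parse_verify_status_py_alt result
instance (result : List (String × List (List (String × String)))) (out : String) : Decidable (Spec_parse_verify_status_py result out) := by unfold Spec_parse_verify_status_py; infer_instance

-- ===== CLAIM (what is proved, stated in full; the proofs are below) =====
def Claim_equal_parse_verify_status_py : Prop := ∀ (result : List (String × List (List (String × String)))), Dom_parse_verify_status_py result → Spec_parse_verify_status_py result (parse_verify_status_py result)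

-- ===== LEMMAS AND PROOFS =====

-- A's early-return scan is the List.any of the per-step hit test
lemma scan_eq_any (steps : List (List (String × String))) (signals : List String) :
    scanStepsForSignals steps signals
      = steps.any (fun step => signals.any (fun s => PySem.Str.isIn s (pvCombined step))) := by
  induction steps with
  | nil => rfl
  | cons step rest ih =>
    simp only [scanStepsForSignals, List.any_cons, ih]
    split <;> simp_all

-- B's flag fold computes the three List.any's (accumulator generalized)
lemma fold_flags (steps : List (List (String × String))) (r i a : Bool) :
    steps.foldl
        (fun (acc : Bool × Bool × Bool) step =>
          let combined := pvCombined step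
          (acc.1 || pvResolvedSignals.any (fun s => PySem.Str.isIn s combined),
           acc.2.1 || pvInReviewSignals.any (fun s => PySem.Str.isIn s combined),
           acc.2.2 || pvActiveSignals.any (fun s => PySem.Str.isIn s combined)))
        (r, i, a)
      = (r || steps.any (fun step => pvResolvedSignals.any (fun s => PySem.Str.isIn s (pvCombined step))),
         i || steps.any (fun step => pvInReviewSignals.any (fun s => PySem.Str.isIn s (pvCombined step))),
         a || steps.any (fun step => pvActiveSignals.any (fun s => PySem.Str.isIn s (pvCombined step)))) := by
  induction steps generalizing r i a with
  | nil => simp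
  | cons step rest ih =>
    simp only [List.foldl_cons, List.any_cons, ih, Bool.or_assoc]

-- ===== VERDICT (by name: the statement is the Claim_ definition above) =====
theorem parse_verify_status_py_spec : Claim_equal_parse_verify_status_py := by
  intro result _
  show parse_verify_status_py result = parse_verify_status_py_alt result
  unfold parse_verify_status_py parse_verify_status_py_alt
  cases h : pvPhase1 (pvSteps result).reverse with
  | some reason => simp [h]
  | none =>
    simp only [h, fold_flags, scan_eq_any, Bool.false_or]
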